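-- pv_equiv track=rewrite | github.com/dhruvd-1/AI-Powered-Indian-Board-of-Studies-Automation- | src/nba/co_po_matrix.py | _build_assessment_matrix_table
-- ===== SOURCE A (Python) =====
-- from typing import Dict, List, Optional
--
-- def _build_assessment_matrix_table(matrix_data: Dict) -> List[List]:
--     """Build table for assessment matrix."""
--
--     mapping = matrix_data['mapping']
--
--     # Get all unique COs and POs
--     cos = sorted(mapping.keys())
--     pos = set()
--     for co_pos in mapping.values():
--         pos.update(co_pos.keys())
--     pos = sorted(pos)
--
--     # Header row
--     header = ['CO / PO'] + pos
--
--     # Data rows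
--     rows = [header]
--
--     for co in cos:
--         row = [co]
--
--         for po in pos:
--             marks = mapping.get(co, {}).get(po, 0)
--             row.append(str(marks) if marks > 0 else '-')
--
--         rows.append(row)
--
--     # Total row
--     total_row = ['Total']
--     for po in pos:
--         total = sum(mapping.get(co, {}).get(po, 0) for co in cos)
--         total_row.append(str(total) if total > 0 else '-')
--
--     rows.append(total_row)
--
--     return rows
-- ===== SOURCE B (Python) =====
-- def _build_assessment_matrix_table(matrix_data):
--     """Build table for assessment matrix (single fused pass with a totals accumulator)."""
--
--     mapping = matrix_data['mapping']
--
--     # Column set: all POs that appear anywhere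
--     pos = set()
--     for co_pos in mapping.values():
--         pos.update(co_pos.keys())
--     pos = sorted(pos)
--
--     # One pass over the grid: emit each data row and accumulate per-PO totals
--     totals = {po: 0 for po in pos}
--     rows = [['CO / PO'] + pos]
--     for co in sorted(mapping):
--         co_map = mapping[co]
--         row = [co]
--         for po in pos:
--             marks = co_map.get(po, 0)
--             totals[po] += marks
--             row.append(str(marks) if marks > 0 else '-')
--         rows.append(row)
--
--     rows.append(['Total'] + [str(t) if t > 0 else '-' for t in totals.values()])
--     return rows
-- ===== Notes on version B (the rewrite author's own statement) =====
-- stated objective: alternative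
-- what changed: B fuses A's two grid passes into one: a single loop over sorted COs builds each data row and accumulates per-PO totals in a dict, and the total row is read off the accumulator instead of re-scanning the whole mapping per PO.
import Mathlib
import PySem

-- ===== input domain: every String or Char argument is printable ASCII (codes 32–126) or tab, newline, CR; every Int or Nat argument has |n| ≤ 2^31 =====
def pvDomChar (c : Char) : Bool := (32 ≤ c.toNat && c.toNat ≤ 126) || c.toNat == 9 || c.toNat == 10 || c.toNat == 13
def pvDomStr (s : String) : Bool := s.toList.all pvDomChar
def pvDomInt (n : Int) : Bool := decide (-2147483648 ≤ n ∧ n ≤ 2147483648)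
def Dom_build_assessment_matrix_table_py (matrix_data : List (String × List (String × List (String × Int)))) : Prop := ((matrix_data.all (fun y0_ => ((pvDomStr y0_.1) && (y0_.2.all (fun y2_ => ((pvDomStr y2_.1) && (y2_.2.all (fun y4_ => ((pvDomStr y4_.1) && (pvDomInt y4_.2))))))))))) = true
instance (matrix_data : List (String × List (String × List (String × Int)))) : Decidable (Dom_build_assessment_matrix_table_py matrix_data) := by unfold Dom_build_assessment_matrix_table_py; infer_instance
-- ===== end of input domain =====

-- B fuses A's two grid passes into one loop with a per-PO totals accumulator; equal output proved on all inputs where A returns ('mapping' key present).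

-- boundary adapter (type convention): the Python dict[str, dict[str, dict[str, int]]] arrives as an
-- association list; build the PySem.Dict (Python dict semantics: duplicate keys overwrite in place)
def pvToDict (matrix_data : List (String × List (String × List (String × Int)))) :
    PySem.Dict String (PySem.Dict String (PySem.Dict String Int)) :=
  PySem.Dict.ofList (matrix_data.map (fun p =>
    (p.1, PySem.Dict.ofList (p.2.map (fun q => (q.1, PySem.Dict.ofList q.2))))))

-- ===== PORT A =====
def build_assessment_matrix_table_py (matrix_data : List (String × List (String × List (String × Int)))) : List (List String) :=
  -- matrix_data['mapping']: KeyError if absent — Pre_ requires the key, so getD's default is unreachable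
  let mapping := ((pvToDict matrix_data).get? "mapping").getD PySem.Dict.empty
  let cos := PySem.List.sorted mapping.keys (fun k => k) false
  let pos : PySem.Set String :=
    mapping.values.foldl (fun s co_pos => PySem.Set.update s co_pos.keys) PySem.Set.empty
  let pos := PySem.List.sorted pos (fun k => k) false
  let header := "CO / PO" :: pos
  let rows : List (List String) := [header]
  let rows := cos.foldl (fun rows co =>
    let row := pos.foldl (fun row po =>
      let marks := (mapping.getD co PySem.Dict.empty).getD po 0
      row ++ [if marks > 0 then PySem.Int.toStr marks else "-"]) [co]
    rows ++ [row]) rows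
  let total_row := pos.foldl (fun total_row po =>
    let total := (cos.map (fun co => (mapping.getD co PySem.Dict.empty).getD po 0)).sum
    total_row ++ [if total > 0 then PySem.Int.toStr total else "-"]) ["Total"]
  rows ++ [total_row]

-- ===== PORT B =====
def build_assessment_matrix_table_py_alt (matrix_data : List (String × List (String × List (String × Int)))) : List (List String) :=
  let mapping := ((pvToDict matrix_data).get? "mapping").getD PySem.Dict.empty
  let pos : PySem.Set String :=
    mapping.values.foldl (fun s co_pos => PySem.Set.update s co_pos.keys) PySem.Set.empty
  let pos := PySem.List.sorted pos (fun k => k) false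
  let totals : PySem.Dict String Int := pos.foldl (fun t po => t.insert po 0) PySem.Dict.empty
  let st := (PySem.List.sorted mapping.keys (fun k => k) false).foldl
    (fun (st : List (List String) × PySem.Dict String Int) co =>
      -- mapping[co]: co is one of mapping's keys, so get? is some and the default is unreachable
      let co_map := (mapping.get? co).getD PySem.Dict.empty
      let st2 := pos.foldl (fun (st2 : List String × PySem.Dict String Int) po =>
        let marks := co_map.getD po 0
        (st2.1 ++ [if marks > 0 then PySem.Int.toStr marks else "-"],
         st2.2.modify po 0 (· + marks))) ([co], st.2)
      (st.1 ++ [st2.1], st2.2))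
    ([("CO / PO" :: pos)], totals)
  st.1 ++ [("Total" :: st.2.values.map (fun t => if t > 0 then PySem.Int.toStr t else "-"))]

-- ===== PRECONDITION & SPEC =====
-- Pre_: exactly the inputs where Python A returns (no 'mapping' key = KeyError)
def Pre_build_assessment_matrix_table_py (matrix_data : List (String × List (String × List (String × Int)))) : Prop :=
  (pvToDict matrix_data).contains "mapping" = true
instance (matrix_data : List (String × List (String × List (String × Int)))) : Decidable (Pre_build_assessment_matrix_table_py matrix_data) := by unfold Pre_build_assessment_matrix_table_py; infer_instance

def pvWitness_build_assessment_matrix_table_py : (List (String × List (String × List (String × Int)))) :=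
  [("mapping", [("CO1", [("PO1", 3), ("PO2", 0)]), ("CO2", [("PO1", 2)])])]

def Spec_build_assessment_matrix_table_py (matrix_data : List (String × List (String × List (String × Int)))) (out : List (List String)) : Prop := out = build_assessment_matrix_table_py_alt matrix_data
instance (matrix_data : List (String × List (String × List (String × Int)))) (out : List (List String)) : Decidable (Spec_build_assessment_matrix_table_py matrix_data out) := by unfold Spec_build_assessment_matrix_table_py; infer_instance

-- ===== CLAIM (what is proved, stated in full; the proofs are below) =====
def Claim_equal_build_assessment_matrix_table_py : Prop := ∀ (matrix_data : List (String × List (String × List (String × Int)))), Dom_build_assessment_matrix_table_py matrix_data → Pre_build_assessment_matrix_table_py matrix_data → Spec_build_assessment_matrix_table_py matrix_data (build_assessment_matrix_table_py matrix_data)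

-- ===== LEMMAS AND PROOFS =====

-- a fold of Set.update from a Nodup set stays Nodup
theorem pv_nodup_foldl_update {α β : Type} [BEq α] [LawfulBEq α] (l : List β) (f : β → List α)
    (s : PySem.Set α) (h : s.Nodup) : (l.foldl (fun s x => PySem.Set.update s (f x)) s).Nodup := by
  induction l generalizing s with
  | nil => exact h
  | cons x t ih => exact ih _ (PySem.Set.nodup_update s (f x) h)

-- a modify-fold over keys not containing po leaves po's value alone
theorem pv_getD_foldl_modify_not_mem (l : List String) (t : PySem.Dict String Int)
    (f : String → Int → Int) (po : String) (h : po ∉ l) :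
    (l.foldl (fun t q => t.modify q 0 (f q)) t).getD po 0 = t.getD po 0 := by
  induction l generalizing t with
  | nil => rfl
  | cons q r ih =>
    simp only [List.mem_cons, not_or] at h
    simp only [List.foldl_cons, ih _ h.2, PySem.Dict.getD_modify, if_neg h.1]

-- an insert-fold over keys not containing po leaves po's value alone
theorem pv_getD_foldl_insert_not_mem (l : List String) (t : PySem.Dict String Int)
    (po : String) (h : po ∉ l) :
    (l.foldl (fun t q => t.insert q (0 : Int)) t).getD po 0 = t.getD po 0 := by
  induction l generalizing t with
  | nil => rfl
  | cons q r ih =>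
    simp only [List.mem_cons, not_or] at h
    simp only [List.foldl_cons, ih _ h.2, PySem.Dict.getD_insert, if_neg h.1]

-- one row's modify-fold adds g po to po's value (po occurring exactly once)
theorem pv_getD_foldl_modify_mem (l : List String) (t : PySem.Dict String Int)
    (g : String → Int) (po : String) (hmem : po ∈ l) (hnd : l.Nodup) :
    (l.foldl (fun t q => t.modify q 0 (fun x => x + g q)) t).getD po 0 = t.getD po 0 + g po := by
  induction l generalizing t with
  | nil => cases hmem
  | cons q r ih =>
    simp only [List.foldl_cons]
    rcases List.mem_cons.mp hmem with hpq | hpr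
    · subst hpq
      have hnr : po ∉ r := (List.nodup_cons.mp hnd).1
      rw [pv_getD_foldl_modify_not_mem r _ _ po hnr, PySem.Dict.getD_modify, if_pos rfl]
    · have hne : po ≠ q := by
        rintro rfl; exact (List.nodup_cons.mp hnd).1 hpr
      rw [ih _ hpr (List.nodup_cons.mp hnd).2, PySem.Dict.getD_modify, if_neg hne]

-- the zero-initialiser: every po ∈ l starts at 0
theorem pv_getD_init_zero (l : List String) (t : PySem.Dict String Int) (po : String)
    (hmem : po ∈ l) :
    (l.foldl (fun t q => t.insert q (0 : Int)) t).getD po 0 = 0 := by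
  induction l generalizing t with
  | nil => cases hmem
  | cons q r ih =>
    simp only [List.foldl_cons]
    by_cases hpr : po ∈ r
    · exact ih _ hpr
    · have hpq : po = q := by rcases List.mem_cons.mp hmem with h | h; exact h; exact absurd h hpr
      subst hpq
      rw [pv_getD_foldl_insert_not_mem r _ po hpr, PySem.Dict.getD_insert, if_pos rfl]

-- the fused outer loop accumulates, per po, the sum of marks over all COs
theorem pv_getD_outer (pos : List String) (m : String → String → Int) (cs : List String)
    (t : PySem.Dict String Int) (po : String) (hmem : po ∈ pos) (hnd : pos.Nodup) :
    (cs.foldl (fun t co => pos.foldl (fun t q => t.modify q 0 (fun x => x + m co q)) t) t).getD po 0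
      = t.getD po 0 + (cs.map (fun co => m co po)).sum := by
  induction cs generalizing t with
  | nil => simp
  | cons c r ih =>
    simp only [List.foldl_cons, List.map_cons, List.sum_cons]
    rw [ih _, pv_getD_foldl_modify_mem pos t (fun q => m c q) po hmem hnd]
    ring

-- keys of the totals dict stay exactly pos through the whole computation
theorem pv_update_of_subset {α : Type} [BEq α] [LawfulBEq α] (l : List α) (s : PySem.Set α)
    (h : ∀ x ∈ l, x ∈ s) : PySem.Set.update s l = s := by
  induction l generalizing s with
  | nil => rfl
  | cons x t ih =>
    rw [PySem.Set.update_cons, PySem.Set.add_of_mem (h x (List.mem_cons_self))]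
    exact ih s (fun y hy => h y (List.mem_cons_of_mem x hy))

theorem pv_keys_init (pos : List String) (hnd : pos.Nodup) :
    (pos.foldl (fun t po => t.insert po (0 : Int)) PySem.Dict.empty).keys = pos := by
  rw [PySem.Dict.keys_foldl_insert pos (fun _ _ => (0 : Int)) PySem.Dict.empty]
  simp only [PySem.Dict.keys_empty, PySem.Set.update_nil_left]
  exact PySem.Set.ofList_eq_self_of_nodup pos hnd

theorem pv_keys_outer (pos : List String) (m : String → String → Int) (cs : List String)
    (t : PySem.Dict String Int) (hk : t.keys = pos) :
    (cs.foldl (fun t co => pos.foldl (fun t q => t.modify q 0 (fun x => x + m co q)) t) t).keys = pos := by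
  induction cs generalizing t with
  | nil => exact hk
  | cons c r ih =>
    apply ih
    rw [PySem.Dict.keys_foldl_modify pos 0 (fun _ q => (fun x => x + m c q)) t, hk,
      pv_update_of_subset pos pos (fun x hx => hx)]

-- cell rendering shared by the statements below (proof-side abbreviation; the ports spell it out)
def pvCell (n : Int) : String := if n > 0 then PySem.Int.toStr n else "-"

-- the heart of the equivalence, stated over an arbitrary mapping, column list pos (Nodup) and row list cos
theorem pv_core (mapping : PySem.Dict String (PySem.Dict String Int)) (cos pos : List String)
    (hnd : pos.Nodup) :
    (cos.foldl (fun rows co =>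
        rows ++ [pos.foldl (fun row po =>
          row ++ [pvCell ((mapping.getD co PySem.Dict.empty).getD po 0)]) [co]])
      [("CO / PO" :: pos)])
    ++ [pos.foldl (fun total_row po =>
          total_row ++ [pvCell ((cos.map (fun co => (mapping.getD co PySem.Dict.empty).getD po 0)).sum)])
        ["Total"]]
    =
    (cos.foldl (fun (st : List (List String) × PySem.Dict String Int) co =>
        (st.1 ++ [(pos.foldl (fun (st2 : List String × PySem.Dict String Int) po =>
            (st2.1 ++ [pvCell (((mapping.get? co).getD PySem.Dict.empty).getD po 0)],
             st2.2.modify po 0 (· + ((mapping.get? co).getD PySem.Dict.empty).getD po 0))) ([co], st.2)).1],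
         (pos.foldl (fun (st2 : List String × PySem.Dict String Int) po =>
            (st2.1 ++ [pvCell (((mapping.get? co).getD PySem.Dict.empty).getD po 0)],
             st2.2.modify po 0 (· + ((mapping.get? co).getD PySem.Dict.empty).getD po 0))) ([co], st.2)).2))
      ([("CO / PO" :: pos)], pos.foldl (fun t po => t.insert po (0 : Int)) PySem.Dict.empty)).1
    ++ [("Total" ::
        ((cos.foldl (fun (st : List (List String) × PySem.Dict String Int) co =>
            (st.1 ++ [(pos.foldl (fun (st2 : List String × PySem.Dict String Int) po =>
                (st2.1 ++ [pvCell (((mapping.get? co).getD PySem.Dict.empty).getD po 0)],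
                 st2.2.modify po 0 (· + ((mapping.get? co).getD PySem.Dict.empty).getD po 0))) ([co], st.2)).1],
             (pos.foldl (fun (st2 : List String × PySem.Dict String Int) po =>
                (st2.1 ++ [pvCell (((mapping.get? co).getD PySem.Dict.empty).getD po 0)],
                 st2.2.modify po 0 (· + ((mapping.get? co).getD PySem.Dict.empty).getD po 0))) ([co], st.2)).2))
          ([("CO / PO" :: pos)], pos.foldl (fun t po => t.insert po (0 : Int)) PySem.Dict.empty)).2.values.map
          (fun t => pvCell t)))] := by
  -- align A's dict access with B's (mapping.get(co, {}) vs mapping[co])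
  simp only [PySem.Dict.getD_eq_get?_getD]
  set cm : String → String → Int :=
    fun co po => (((mapping.get? co).getD PySem.Dict.empty).get? po).getD 0 with hcm
  -- B's fused loop is two independent accumulators: the rows fold and the totals fold
  rw [show (fun (st : List (List String) × PySem.Dict String Int) co =>
        (st.1 ++ [(pos.foldl (fun (st2 : List String × PySem.Dict String Int) po =>
            (st2.1 ++ [pvCell (cm co po)], st2.2.modify po 0 (· + cm co po))) ([co], st.2)).1],
         (pos.foldl (fun (st2 : List String × PySem.Dict String Int) po =>
            (st2.1 ++ [pvCell (cm co po)], st2.2.modify po 0 (· + cm co po))) ([co], st.2)).2))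
      = (fun (st : List (List String) × PySem.Dict String Int) co =>
        ((fun (r : List (List String)) co =>
            r ++ [pos.foldl (fun row po => row ++ [pvCell (cm co po)]) [co]]) st.1 co,
         (fun (t : PySem.Dict String Int) co =>
            pos.foldl (fun t po => t.modify po 0 (fun x => x + cm co po)) t) st.2 co)) from by
      funext st co
      rw [PySem.List.foldl_prod_mk (fun row po => row ++ [pvCell (cm co po)])
        (fun t po => t.modify po 0 (fun x => x + cm co po)) pos [co] st.2]]
  rw [PySem.List.foldl_prod_mk
    (fun (r : List (List String)) co => r ++ [pos.foldl (fun row po => row ++ [pvCell (cm co po)]) [co]])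
    (fun (t : PySem.Dict String Int) co =>
      pos.foldl (fun t po => t.modify po 0 (fun x => x + cm co po)) t)
    cos [("CO / PO" :: pos)] (pos.foldl (fun t po => t.insert po (0 : Int)) PySem.Dict.empty)]
  -- data rows agree
  congr 1
  -- total rows agree
  set T : PySem.Dict String Int :=
    cos.foldl (fun t co => pos.foldl (fun t po => t.modify po 0 (fun x => x + cm co po)) t)
      (pos.foldl (fun t po => t.insert po (0 : Int)) PySem.Dict.empty) with hT
  have hk0 : (pos.foldl (fun t po => t.insert po (0 : Int)) PySem.Dict.empty).keys = pos :=
    pv_keys_init pos hnd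
  have hkT : T.keys = pos := pv_keys_outer pos cm cos _ hk0
  have hndkT : T.keys.Nodup := by rw [hkT]; exact hnd
  have hvals : T.values = pos.map (fun k => T.getD k 0) := by
    rw [PySem.Dict.values_eq_map_keys T hndkT 0, hkT]
  have hget : ∀ po ∈ pos, T.getD po 0 = (cos.map (fun co => cm co po)).sum := by
    intro po hpo
    rw [hT, pv_getD_outer pos cm cos _ po hpo hnd, pv_getD_init_zero pos _ po hpo, zero_add]
  rw [PySem.List.foldl_append_singleton_eq_map
    (fun po => pvCell ((cos.map (fun co => cm co po)).sum)) pos ["Total"]]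
  rw [hvals, List.map_map]
  have : pos.map (fun po => pvCell ((cos.map (fun co => cm co po)).sum))
      = pos.map ((fun t => pvCell t) ∘ fun k => T.getD k 0) := by
    apply List.map_congr_left
    intro po hpo
    simp [Function.comp, hget po hpo]
  rw [this]
  rfl

-- ===== VERDICT (by name: the statement is the Claim_ definition above) =====
theorem build_assessment_matrix_table_py_spec : Claim_equal_build_assessment_matrix_table_py := by
  intro matrix_data _ _
  unfold Spec_build_assessment_matrix_table_py
  unfold build_assessment_matrix_table_py build_assessment_matrix_table_py_alt
  refine pv_core (((pvToDict matrix_data).get? "mapping").getD PySem.Dict.empty) _ _ ?_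
  exact (PySem.List.sorted_perm _ (fun k => k) false).nodup_iff.mpr
    (pv_nodup_foldl_update _ (fun co_pos : PySem.Dict String Int => co_pos.keys)
      PySem.Set.empty List.nodup_nil)
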